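-- pv_equiv track=rewrite | github.com/gauravmalaviya143/functions | count&display.py | count
-- ===== SOURCE A (Python) =====
-- def count(lst):
--     more = 0
--     less = 0
--
--     for i in lst:
--         if len(i)>5:
--             more+=1
--         else:
--             less+=1
--     return more,less
-- ===== SOURCE B (Python) =====
-- def count(lst):
--     # Sort the item lengths, then binary-search for the first length > 5:
--     # its index is the count of items with length <= 5.
--     lengths = sorted(len(s) for s in lst)
--     lo, hi = 0, len(lengths)
--     while lo < hi:
--         mid = (lo + hi) // 2
--         if lengths[mid] > 5:
--             hi = mid
--         else:
--             lo = mid + 1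
--     return len(lst) - lo, lo
-- ===== Notes on version B (the rewrite author's own statement) =====
-- stated objective: alternative
-- what changed: B sorts the item lengths and locates the <=5 / >5 boundary with a hand-written binary search, taking less as the boundary index and more as len(lst) minus it, instead of A's single pass with two if/else accumulators.
import Mathlib
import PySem

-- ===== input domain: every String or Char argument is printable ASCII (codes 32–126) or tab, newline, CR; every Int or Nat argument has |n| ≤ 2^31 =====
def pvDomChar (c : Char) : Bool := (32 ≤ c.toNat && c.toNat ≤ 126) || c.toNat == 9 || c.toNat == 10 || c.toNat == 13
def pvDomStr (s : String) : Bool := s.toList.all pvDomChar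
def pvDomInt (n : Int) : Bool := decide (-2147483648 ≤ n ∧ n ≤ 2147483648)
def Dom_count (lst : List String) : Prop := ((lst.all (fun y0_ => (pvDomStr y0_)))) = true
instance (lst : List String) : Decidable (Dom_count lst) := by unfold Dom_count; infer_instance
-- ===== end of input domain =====

-- B is an alternative algorithm: sort the item lengths and binary-search the <=5 / >5 boundary.
-- ===== PORT A =====
def count (lst : List String) : Int × Int :=
  lst.foldl (fun (acc : Int × Int) i =>
    if (PySem.Str.len i) > 5 then (acc.1 + 1, acc.2) else (acc.1, acc.2 + 1))
    (0, 0)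

-- ===== PORT B =====
-- the while loop of Source B; the index mid is always in range, so pyGet?'s default is never used
def countBsearch (lengths : List Int) (lo hi : Nat) : Nat :=
  if lo < hi then
    if (PySem.List.pyGet? lengths (((lo + hi) / 2 : Nat) : Int)).getD 0 > 5 then
      countBsearch lengths lo ((lo + hi) / 2)
    else countBsearch lengths ((lo + hi) / 2 + 1) hi
  else lo
termination_by hi - lo
decreasing_by all_goals omega

def count_alt (lst : List String) : Int × Int :=
  let lengths := PySem.List.sorted (lst.map (fun s => PySem.Str.len s)) (fun x => x) false
  let lo := countBsearch lengths 0 lengths.length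
  ((lst.length : Int) - (lo : Int), (lo : Int))

-- ===== PRECONDITION & SPEC =====
def Spec_count (lst : List String) (out : Int × Int) : Prop := out = count_alt lst
instance (lst : List String) (out : Int × Int) : Decidable (Spec_count lst out) := by unfold Spec_count; infer_instance

-- ===== CLAIM (what is proved, stated in full; the proofs are below) =====
def Claim_equal_count : Prop := ∀ (lst : List String), Dom_count lst → Spec_count lst (count lst)

-- ===== LEMMAS AND PROOFS =====

-- A's fold with general accumulator
lemma count_foldl (lst : List String) (m l : Int) :
    lst.foldl (fun (acc : Int × Int) i =>
      if (PySem.Str.len i) > 5 then (acc.1 + 1, acc.2) else (acc.1, acc.2 + 1))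
      (m, l)
    = (m + ((lst.length : Int) - (lst.countP (fun s => decide (PySem.Str.len s ≤ 5)) : Int)),
       l + (lst.countP (fun s => decide (PySem.Str.len s ≤ 5)) : Int)) := by
  induction lst generalizing m l with
  | nil => simp
  | cons x xs ih =>
    by_cases h : PySem.Str.len x > 5
    · rw [List.foldl_cons, if_pos h, ih, List.countP_cons_of_neg (by simpa using h)]
      simp only [List.length_cons, Prod.ext_iff]
      push_cast
      exact ⟨by omega, trivial⟩
    · rw [List.foldl_cons, if_neg h, ih, List.countP_cons_of_pos (by simpa using h)]
      simp only [List.length_cons, Prod.ext_iff]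
      push_cast
      constructor <;> omega

-- if all indices below k satisfy the predicate and all from k on fail it, countP = k
lemma countP_of_split (L : List Int) (k : Nat) (hk : k ≤ L.length)
    (hlow : ∀ i (h : i < L.length), i < k → L[i] ≤ 5)
    (hhigh : ∀ i (h : i < L.length), k ≤ i → 5 < L[i]) :
    L.countP (fun x => decide (x ≤ 5)) = k := by
  induction L generalizing k with
  | nil => simp only [List.countP_nil, List.length_nil] at *; omega
  | cons x xs ih =>
    cases k with
    | zero =>
      rw [List.countP_cons_of_neg (by simpa using hhigh 0 (by simp) (by omega))]
      exact ih 0 (by omega) (fun i h hi => by omega)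
        (fun i h hi => by simpa using hhigh (i+1) (by simpa using h) (by omega))
    | succ k =>
      rw [List.countP_cons_of_pos (by simpa using hlow 0 (by simp) (by omega))]
      rw [ih k (by simpa using hk)
        (fun i h hi => by simpa using hlow (i+1) (by simpa using h) (by omega))
        (fun i h hi => by simpa using hhigh (i+1) (by simpa using h) (by omega))]

lemma pyGet?_getD_in_range (L : List Int) (i : Nat) (h : i < L.length) :
    (PySem.List.pyGet? L (i : Int)).getD 0 = L[i] := by
  simp [PySem.List.pyGet?, PySem.List.pyIdx?, h]

lemma countBsearch_correct (L : List Int) (hs : L.Pairwise (· ≤ ·)) (lo hi : Nat)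
    (h1 : lo ≤ hi) (h2 : hi ≤ L.length)
    (hlow : ∀ i (h : i < L.length), i < lo → L[i] ≤ 5)
    (hhigh : ∀ i (h : i < L.length), hi ≤ i → 5 < L[i]) :
    countBsearch L lo hi = L.countP (fun x => decide (x ≤ 5)) := by
  rw [countBsearch]
  by_cases hlt : lo < hi
  · rw [if_pos hlt]
    have hmid1 : lo ≤ (lo + hi) / 2 := by omega
    have hmid2 : (lo + hi) / 2 < hi := by omega
    have hmidlen : (lo + hi) / 2 < L.length := by omega
    rw [pyGet?_getD_in_range L _ hmidlen]
    have hmono : ∀ i j (hi2 : i < L.length) (hj2 : j < L.length), i ≤ j → L[i] ≤ L[j] := by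
      intro i j hi2 hj2 hij
      rcases Nat.eq_or_lt_of_le hij with heq | hlt'
      · subst heq; exact le_refl _
      · exact List.pairwise_iff_getElem.mp hs _ _ hi2 hj2 hlt'
    by_cases hv : L[(lo + hi) / 2] > 5
    · rw [if_pos hv]
      exact countBsearch_correct L hs lo ((lo + hi) / 2) (by omega) (by omega) hlow
        (fun i h hi' => lt_of_lt_of_le hv (hmono _ _ hmidlen h hi'))
    · rw [if_neg hv]
      rw [Int.not_lt] at hv
      exact countBsearch_correct L hs ((lo + hi) / 2 + 1) hi (by omega) h2
        (fun i h hi' => le_trans (hmono _ _ h hmidlen (by omega)) hv)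
        hhigh
  · rw [if_neg hlt]
    have : lo = hi := by omega
    subst this
    exact (countP_of_split L lo h2 hlow (fun i h hi' => hhigh i h hi')).symm
termination_by hi - lo
decreasing_by all_goals omega

-- ===== VERDICT (by name: the statement is the Claim_ definition above) =====
theorem count_spec : Claim_equal_count := by
  intro lst _
  unfold Spec_count count count_alt
  set L := PySem.List.sorted (lst.map (fun s => PySem.Str.len s)) (fun x => x) false with hL
  have hperm : L.Perm (lst.map (fun s => PySem.Str.len s)) := PySem.List.sorted_perm _ _ _
  have hsorted : L.Pairwise (· ≤ ·) := by
    simpa using PySem.List.sorted_pairwise (lst.map (fun s => PySem.Str.len s)) (fun x => x)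
  have hb := countBsearch_correct L hsorted 0 L.length (by omega) (by omega)
    (fun i h hi => by omega) (fun i h hi => by omega)
  rw [count_foldl]
  have hcount : L.countP (fun x => decide (x ≤ 5))
      = lst.countP (fun s => decide (PySem.Str.len s ≤ 5)) := by
    rw [hperm.countP_eq, List.countP_map]
    rfl
  simp only [hb, hcount, zero_add]
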